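-- pv_equiv track=rewrite | github.com/SixingYan/Sketch-for-Data-Stream | experiment/drawingIOA.py | refine
-- ===== SOURCE A (Python) =====
-- def refine(vList,step):
--     newVList = []
--     total = 0
--     i = 0
--     for v in vList:
--         i += 1
--         total += v[1]
--         if i == step:
--             newVList.append([v[0], total])
--             i = 0
--             total = 0
--     return newVList
-- ===== SOURCE B (Python) =====
-- def refine(vList, step):
--     if step <= 0:
--         return []
--     n = len(vList) // step
--     out = []
--     for g in range(n):
--         chunk = vList[g * step:(g + 1) * step]
--         out.append([chunk[-1][0], sum(x[1] for x in chunk)])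
--     return out
-- ===== Notes on version B (the rewrite author's own statement) =====
-- stated objective: alternative
-- what changed: Replaces the streaming accumulate-and-reset counter loop with an index-driven block decomposition: compute the number of complete groups n = len(vList)//step and slice each group directly, summing its weights with sum().
import Mathlib
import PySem

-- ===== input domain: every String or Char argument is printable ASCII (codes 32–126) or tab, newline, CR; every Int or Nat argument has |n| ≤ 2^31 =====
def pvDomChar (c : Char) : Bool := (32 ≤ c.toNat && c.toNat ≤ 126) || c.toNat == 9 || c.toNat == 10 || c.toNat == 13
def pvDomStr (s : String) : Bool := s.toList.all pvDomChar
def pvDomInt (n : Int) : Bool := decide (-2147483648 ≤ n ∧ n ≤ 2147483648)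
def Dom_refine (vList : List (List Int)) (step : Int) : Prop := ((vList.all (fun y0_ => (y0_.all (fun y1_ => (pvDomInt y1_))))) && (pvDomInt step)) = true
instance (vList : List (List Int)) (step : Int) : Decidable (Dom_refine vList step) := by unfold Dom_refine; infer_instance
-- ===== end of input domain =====

-- B replaces A's streaming accumulate-and-reset loop by an index-driven block
-- decomposition (n = len // step complete groups, each taken as a slice); alternative, same cost.


-- ===== PORT A =====
-- the loop body of A: state = (newVList, total, i)
def refineStep (step : Int) (st : List (List Int) × Int × Int) (v : List Int) :
    List (List Int) × Int × Int :=
  let i := st.2.2 + 1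
  let total := st.2.1 + PySem.List.pyGetD v 1 0
  if i = step then (st.1 ++ [[PySem.List.pyGetD v 0 0, total]], 0, 0)
  else (st.1, total, i)

def refine (vList : List (List Int)) (step : Int) : List (List Int) :=
  (vList.foldl (refineStep step) (([] : List (List Int)), (0 : Int), (0 : Int))).1

-- ===== PORT B =====
def refine_alt (vList : List (List Int)) (step : Int) : List (List Int) :=
  if step ≤ 0 then []
  else
    (PySem.List.pyRange 0 (PySem.Int.floordiv (vList.length : Int) step) 1).foldl
      (fun out g =>
        out ++ [[PySem.List.pyGetD
                   (PySem.List.pyGetD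
                     (PySem.List.slice vList (some (g * step)) (some ((g + 1) * step))) (-1) []) 0 0,
                 ((PySem.List.slice vList (some (g * step)) (some ((g + 1) * step))).map
                     (fun x => PySem.List.pyGetD x 1 0)).sum]])
      []

-- ===== PRECONDITION & SPEC =====
-- Pre_ excludes exactly the inputs on which Python A raises IndexError: some row shorter than 2 (v[1] is read for every row).
def Pre_refine (vList : List (List Int)) (_step : Int) : Prop :=
  ∀ v ∈ vList, 2 ≤ v.length
instance (vList : List (List Int)) (step : Int) : Decidable (Pre_refine vList step) := by
  unfold Pre_refine; infer_instance

def pvWitness_refine : List (List Int) × Int := ([[1, 2], [3, 4], [5, 6]], 2)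

def Spec_refine (vList : List (List Int)) (step : Int) (out : List (List Int)) : Prop := out = refine_alt vList step
instance (vList : List (List Int)) (step : Int) (out : List (List Int)) : Decidable (Spec_refine vList step out) := by unfold Spec_refine; infer_instance

-- ===== CLAIM (what is proved, stated in full; the proofs are below) =====
def Claim_equal_refine : Prop := ∀ (vList : List (List Int)) (step : Int), Dom_refine vList step → Pre_refine vList step → Spec_refine vList step (refine vList step)

-- ===== LEMMAS AND PROOFS =====

-- the sum of the weights (second entries) of a block
def sum1 (l : List (List Int)) : Int := (l.map (fun x => PySem.List.pyGetD x 1 0)).sum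

-- common recursive characterisation: the groups of `l` in blocks of `s`
def chunkSpec (s : Nat) (l : List (List Int)) : List (List Int) :=
  if h : s = 0 ∨ l.length < s then []
  else
    [PySem.List.pyGetD ((l.take s).getLast?.getD []) 0 0, sum1 (l.take s)] ::
      chunkSpec s (l.drop s)
termination_by l.length
decreasing_by simp_all; omega

theorem sum1_cons (v : List Int) (tl : List (List Int)) :
    sum1 (v :: tl) = PySem.List.pyGetD v 1 0 + sum1 tl := by
  simp [sum1]

theorem refineStep_neg {step i : Int} (h : ¬ i + 1 = step)
    (acc : List (List Int)) (t : Int) (v : List Int) :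
    refineStep step (acc, t, i) v = (acc, t + PySem.List.pyGetD v 1 0, i + 1) := by
  simp [refineStep, h]

theorem refineStep_pos {step i : Int} (h : i + 1 = step)
    (acc : List (List Int)) (t : Int) (v : List Int) :
    refineStep step (acc, t, i) v
      = (acc ++ [[PySem.List.pyGetD v 0 0, t + PySem.List.pyGetD v 1 0]], 0, 0) := by
  simp [refineStep, h]

-- A's loop never appends while the counter stays below step
theorem foldA_noTrig (step : Int) :
    ∀ (l : List (List Int)) (acc : List (List Int)) (t i : Int),
      i + (l.length : Int) < step →
      l.foldl (refineStep step) (acc, t, i) = (acc, t + sum1 l, i + l.length) := by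
  intro l
  induction l with
  | nil => intro acc t i h; simp [sum1]
  | cons v tl ih =>
      intro acc t i h
      have hlen : i + ((v :: tl).length : Int) = i + 1 + tl.length := by push_cast [List.length_cons]; ring
      have hne : ¬ (i + 1 = step) := by rw [hlen] at h; omega
      rw [List.foldl_cons, refineStep_neg hne, ih _ _ _ (by rw [hlen] at h; omega)]
      rw [sum1_cons, hlen]
      simp [add_assoc]

-- A's loop crossing exactly one block boundary: appends exactly the group of l
theorem foldA_trig (step : Int) :
    ∀ (l : List (List Int)) (acc : List (List Int)) (t i : Int),
      i + (l.length : Int) = step → l ≠ [] →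
      l.foldl (refineStep step) (acc, t, i) =
        (acc ++ [[PySem.List.pyGetD (l.getLast?.getD []) 0 0, t + sum1 l]], 0, 0) := by
  intro l
  induction l with
  | nil => intro _ _ _ _ h; exact absurd rfl h
  | cons v tl ih =>
      intro acc t i h _
      cases tl with
      | nil =>
          have h1 : i + 1 = step := by simpa using h
          rw [List.foldl_cons, refineStep_pos h1]
          simp [sum1, List.getLast?]
      | cons w tw =>
          have hlen : i + ((v :: w :: tw).length : Int)
              = (i + 1) + ((w :: tw).length : Int) := by push_cast [List.length_cons]; ring
          have hne : ¬ (i + 1 = step) := by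
            rw [hlen] at h; simp only [List.length_cons] at h; push_cast at h; omega
          rw [List.foldl_cons, refineStep_neg hne,
              ih _ _ _ (by rw [hlen] at h; exact h) (by simp)]
          simp [sum1_cons, add_assoc]

theorem pyGetD_neg_one_getD {xs : List (List Int)} (h : xs ≠ []) :
    PySem.List.pyGetD xs (-1) [] = xs.getLast?.getD [] := by
  rw [PySem.List.pyGetD_neg_one xs [] h, List.getLast?_eq_some_getLast h]
  rfl

-- A equals the recursive block characterisation, for positive step (fuel on the length)
theorem foldA_chunk_aux (step : Int) (hs : 1 ≤ step) :
    ∀ (m : Nat) (l : List (List Int)), l.length ≤ m → ∀ (acc : List (List Int)),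
      (l.foldl (refineStep step) (acc, 0, 0)).1 = acc ++ chunkSpec step.toNat l := by
  have hcast : ((step.toNat : Int)) = step := Int.toNat_of_nonneg (by omega)
  have hs0 : 1 ≤ step.toNat := by omega
  intro m
  induction m with
  | zero =>
      intro l hl acc
      have : l = [] := List.length_eq_zero_iff.mp (by omega)
      subst this
      rw [chunkSpec, dif_pos (Or.inr (by simp; omega))]
      simp
  | succ m ih =>
      intro l hl acc
      by_cases hlt : l.length < step.toNat
      · rw [chunkSpec, dif_pos (Or.inr hlt)]
        rw [foldA_noTrig step l acc 0 0 (by rw [← hcast]; push_cast; omega)]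
        simp
      · push_neg at hlt
        have htl : (l.take step.toNat).length = step.toNat := by
          rw [List.length_take]; omega
        have hne : l.take step.toNat ≠ [] := by
          intro h; rw [h] at htl; simp at htl; omega
        conv_lhs => rw [← List.take_append_drop step.toNat l]
        rw [List.foldl_append,
            foldA_trig step (l.take step.toNat) acc 0 0 (by rw [htl, hcast]; ring) hne,
            ih (l.drop step.toNat) (by rw [List.length_drop]; omega)]
        conv_rhs => rw [chunkSpec]
        rw [dif_neg (by push_neg; exact ⟨by omega, hlt⟩)]
        simp

theorem foldA_chunk (step : Int) (hs : 1 ≤ step) :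
    ∀ (l : List (List Int)) (acc : List (List Int)),
      (l.foldl (refineStep step) (acc, 0, 0)).1 = acc ++ chunkSpec step.toNat l :=
  fun l => foldA_chunk_aux step hs l.length l le_rfl

-- for step ≤ 0 the counter (kept ≥ 0) never reaches step: A returns the accumulator
theorem foldA_nonpos (step : Int) (hs : step ≤ 0) :
    ∀ (l : List (List Int)) (acc : List (List Int)) (t i : Int), 0 ≤ i →
      (l.foldl (refineStep step) (acc, t, i)).1 = acc := by
  intro l
  induction l with
  | nil => intro acc t i _; rfl
  | cons v tl ih =>
      intro acc t i hi
      have hne : ¬ (i + 1 = step) := by omega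
      rw [List.foldl_cons, refineStep_neg hne]
      exact ih acc _ (i + 1) (by omega)

-- B equals the recursive block characterisation, for positive step
theorem foldB_chunk (step : Int) (hs : 1 ≤ step) :
    ∀ (n : Nat) (l : List (List Int)), n = l.length / step.toNat →
      (List.range n).map
          (fun k =>
            [PySem.List.pyGetD
                (PySem.List.pyGetD ((l.drop (k * step.toNat)).take step.toNat) (-1) []) 0 0,
              sum1 ((l.drop (k * step.toNat)).take step.toNat)]) =
        chunkSpec step.toNat l := by
  have hs0 : 1 ≤ step.toNat := by omega
  intro n
  induction n with
  | zero =>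
      intro l hn
      have hlt : l.length < step.toNat :=
        (Nat.div_eq_zero_iff_lt (by omega)).mp hn.symm
      rw [chunkSpec, dif_pos (Or.inr hlt)]
      simp
  | succ n ih =>
      intro l hn
      have hge : step.toNat ≤ l.length := by
        by_contra hc
        push_neg at hc
        rw [Nat.div_eq_of_lt hc] at hn
        omega
      have hdiv : n = (l.drop step.toNat).length / step.toNat := by
        rw [List.length_drop]
        have := Nat.div_eq_sub_div (by omega : 0 < step.toNat) hge
        omega
      have htl : (l.take step.toNat).length = step.toNat := by
        rw [List.length_take]; omega
      have hne : l.take step.toNat ≠ [] := by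
        intro h; rw [h] at htl; simp at htl; omega
      rw [chunkSpec, dif_neg (by push_neg; exact ⟨by omega, by omega⟩)]
      rw [List.range_succ_eq_map, List.map_cons, List.map_map]
      congr 1
      · simp [pyGetD_neg_one_getD hne]
      · rw [← ih (l.drop step.toNat) hdiv]
        apply List.map_congr_left
        intro k _
        have hdd : l.drop (Nat.succ k * step.toNat)
            = (l.drop step.toNat).drop (k * step.toNat) := by
          rw [List.drop_drop]
          congr 1
          rw [Nat.succ_mul, Nat.mul_comm]
          omega
        simp only [Function.comp_apply, hdd]

theorem refine_eq_alt (vList : List (List Int)) (step : Int) :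
    refine vList step = refine_alt vList step := by
  by_cases hs : step ≤ 0
  · unfold refine refine_alt
    rw [if_pos hs]
    exact foldA_nonpos step hs vList [] 0 0 le_rfl
  · have hs1 : 1 ≤ step := by omega
    have hstep : ((step.toNat : Int)) = step := Int.toNat_of_nonneg (by omega)
    unfold refine refine_alt
    rw [if_neg hs]
    rw [foldA_chunk step hs1 vList []]
    have hfd : PySem.Int.floordiv (vList.length : Int) step
        = ((vList.length / step.toNat : Nat) : Int) := by
      rw [← hstep]; exact PySem.Int.floordiv_natCast _ _
    rw [hfd, PySem.List.pyRange_zero_natCast, List.foldl_map,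
        PySem.List.foldl_append_singleton_eq_map]
    simp only [List.nil_append]
    rw [← foldB_chunk step hs1 (vList.length / step.toNat) vList rfl]
    apply List.map_congr_left
    intro k hk
    have hsl : PySem.List.slice vList (some ((k : Int) * step)) (some (((k : Int) + 1) * step))
        = (vList.drop (k * step.toNat)).take step.toNat := by
      have h1 : ((k : Int) * step) = ((k * step.toNat : Nat) : Int) := by push_cast [hstep]; ring
      have h2 : (((k : Int) + 1) * step) = (((k + 1) * step.toNat : Nat) : Int) := by
        push_cast [hstep]; ring
      rw [h1, h2, PySem.List.slice_natCast]
      congr 1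
      have : (k + 1) * step.toNat = k * step.toNat + step.toNat := by ring
      omega
    rw [hsl]
    rfl

-- ===== VERDICT (by name: the statement is the Claim_ definition above) =====
theorem refine_spec : Claim_equal_refine := by
  intro vList step _ _
  unfold Spec_refine
  exact refine_eq_alt vList step
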